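-- pv_equiv track=rewrite | github.com/Lemito66/advent | Python/2_ponermos_en_marcha_la_fabrica.py | manufacture
-- ===== SOURCE A (Python) =====
-- def manufacture(gifts, materials):
--     #Code here
--     materials_modified = list(materials)
--
--     list_materials = []
--
--     counter = 0
--     for gift in range(len(gifts)):
--         for letter in range(len(gifts[gift])):
--             if gifts[gift][letter] in materials_modified:
--                 counter += 1
--
--         if counter == len(gifts[gift]):
--             list_materials.append(gifts[gift])
--             counter = 0
--         else:
--             counter = 0
--
--
--     return list_materials
--
-- gifts = ['libro', 'ps5']
--
-- materials = 'psli'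
-- ===== SOURCE B (Python) =====
-- def manufacture(gifts, materials):
--     # A gift strips to the empty string under str.strip(materials)
--     # exactly when every one of its letters is a material.
--     return [g for g in gifts if not g.strip(materials)]
-- ===== Notes on version B (the rewrite author's own statement) =====
-- stated objective: idiomatic
-- what changed: Drops A's per-letter membership loop with a counter compared against the gift's length; B keeps a gift iff str.strip(materials) reduces it to the empty string, delegating the whole per-gift scan to one built-in strip call.
import Mathlib
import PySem

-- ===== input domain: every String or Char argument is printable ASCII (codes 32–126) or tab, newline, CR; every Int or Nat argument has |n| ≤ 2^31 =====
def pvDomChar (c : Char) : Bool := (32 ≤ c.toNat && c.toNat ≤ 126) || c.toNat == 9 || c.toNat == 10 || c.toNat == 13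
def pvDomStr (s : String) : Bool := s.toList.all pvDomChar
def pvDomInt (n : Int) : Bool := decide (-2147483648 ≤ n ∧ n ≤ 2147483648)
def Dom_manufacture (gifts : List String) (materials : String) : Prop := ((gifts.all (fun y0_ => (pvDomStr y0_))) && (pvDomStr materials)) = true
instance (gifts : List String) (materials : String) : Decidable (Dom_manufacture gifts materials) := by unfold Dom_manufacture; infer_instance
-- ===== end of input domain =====

-- B replaces A's per-letter membership counter (compared to the gift's length) with one str.strip(materials)
-- call per gift: a gift is kept iff stripping all material characters leaves the empty string (idiomatic; return value only).

-- ===== PORT A =====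
-- literal transliteration: counter threads through the fold over gifts, reset to 0 in both branches
def manufacture (gifts : List String) (materials : String) : List String :=
  let materialsModified := materials.toList
  let st := gifts.foldl
    (fun (st : List String × Nat) gift =>
      let counter := gift.toList.foldl
        (fun c letter => if letter ∈ materialsModified then c + 1 else c) st.2
      if counter = gift.toList.length then (st.1 ++ [gift], 0) else (st.1, 0))
    ([], 0)
  st.1

-- ===== PORT B =====
-- transliteration of Source B: keep g iff g.strip(materials) is the empty (falsy) string
def manufacture_alt (gifts : List String) (materials : String) : List String :=
  gifts.filter (fun g => (PySem.Str.stripChars g materials).isEmpty)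

-- ===== PRECONDITION & SPEC =====
def Spec_manufacture (gifts : List String) (materials : String) (out : List String) : Prop := out = manufacture_alt gifts materials
instance (gifts : List String) (materials : String) (out : List String) : Decidable (Spec_manufacture gifts materials out) := by unfold Spec_manufacture; infer_instance

-- ===== CLAIM (what is proved, stated in full; the proofs are below) =====
def Claim_equal_manufacture : Prop := ∀ (gifts : List String) (materials : String), Dom_manufacture gifts materials → Spec_manufacture gifts materials (manufacture gifts materials)

-- ===== LEMMAS AND PROOFS =====

-- A's inner loop starting at c counts the letters of l that occur in m
lemma counter_eq_countP (m : List Char) (l : List Char) (c : Nat) :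
    l.foldl (fun c letter => if letter ∈ m then c + 1 else c) c
      = c + l.countP (fun letter => decide (letter ∈ m)) := by
  induction l generalizing c with
  | nil => simp
  | cons x xs ih =>
    simp only [List.foldl_cons, List.countP_cons, ih]
    by_cases h : x ∈ m <;> simp [h] <;> omega

-- everything left by dropWhile p satisfies p iff everything did
lemma dropWhile_all_iff (p : Char → Bool) (s : List Char) :
    (∀ x ∈ List.dropWhile p s, p x = true) ↔ (∀ x ∈ s, p x = true) := by
  induction s with
  | nil => simp
  | cons a l ih =>
    by_cases h : p a = true
    · simp [h, ih]
    · simp [h]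

-- the string strips to empty iff every letter is a material
lemma stripChars_empty_iff (s m : List Char) :
    (PySem.Chars.stripChars s m = []) ↔ (∀ x ∈ s, x ∈ m) := by
  unfold PySem.Chars.stripChars
  rw [List.reverse_eq_nil_iff, List.dropWhile_eq_nil_iff]
  constructor
  · intro h x hx
    have := (dropWhile_all_iff _ s).mp (by
      intro y hy
      have := h y (by simpa using hy)
      simpa using this) x hx
    simpa using this
  · intro h y hy
    simp only [List.mem_reverse] at hy
    have := (dropWhile_all_iff (fun c => m.contains c) s).mpr
      (by intro z hz; simpa using h z hz) y hy
    simpa using this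

-- A's per-gift acceptance test agrees with B's strip-to-empty test
lemma pred_eq (m : String) (g : String) :
    (decide (g.toList.foldl (fun c letter => if letter ∈ m.toList then c + 1 else c) 0
        = g.toList.length))
      = (PySem.Str.stripChars g m).isEmpty := by
  rw [counter_eq_countP, Nat.zero_add]
  have key : (PySem.Str.stripChars g m).isEmpty = true ↔ (∀ x ∈ g.toList, x ∈ m.toList) := by
    rw [String.isEmpty_iff, ← String.toList_eq_nil_iff, PySem.Str.toList_stripChars,
      stripChars_empty_iff]
  rcases hb : (PySem.Str.stripChars g m).isEmpty with _ | _
  · simp only [decide_eq_false_iff_not]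
    intro hc
    have hall : ∀ x ∈ g.toList, x ∈ m.toList := by
      intro x hx
      exact of_decide_eq_true (List.countP_eq_length.mp hc x hx)
    rw [← key] at hall
    simp [hb] at hall
  · simp only [decide_eq_true_iff]
    refine List.countP_eq_length.mpr ?_
    intro x hx
    exact decide_eq_true (key.mp hb x hx)

-- A's outer fold, started with counter 0 and any accumulator, appends exactly the filtered gifts
lemma foldl_eq_filter (m : String) (gifts : List String) (acc : List String) :
    (gifts.foldl
      (fun (st : List String × Nat) gift =>
        let counter := gift.toList.foldl
          (fun c letter => if letter ∈ m.toList then c + 1 else c) st.2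
        if counter = gift.toList.length then (st.1 ++ [gift], 0) else (st.1, 0))
      (acc, 0)).1
    = acc ++ gifts.filter (fun g => (PySem.Str.stripChars g m).isEmpty) := by
  induction gifts generalizing acc with
  | nil => simp
  | cons g gs ih =>
    simp only [List.foldl_cons, List.filter_cons]
    rw [← pred_eq m g]
    by_cases h : g.toList.foldl (fun c letter => if letter ∈ m.toList then c + 1 else c) 0 = g.toList.length
    · simp only [decide_eq_true_iff, h, if_true, ih, List.append_assoc, List.singleton_append]
    · simp only [if_neg h, decide_eq_false h, Bool.false_eq_true, if_false, ih]

-- ===== VERDICT (by name: the statement is the Claim_ definition above) =====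
theorem manufacture_spec : Claim_equal_manufacture := by
  intro gifts materials _
  show manufacture gifts materials = manufacture_alt gifts materials
  unfold manufacture manufacture_alt
  exact foldl_eq_filter materials gifts []
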